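-- pv_equiv track=rewrite | github.com/gilliankerr/KoNote-Redux | scripts/find_untranslated.py | is_inside_comment_block
-- ===== SOURCE A (Python) =====
-- def is_inside_comment_block(lines, line_idx):
--     """Check if line is inside {% comment %} ... {% endcomment %}."""
--     depth = 0
--     for i in range(line_idx, -1, -1):
--         if '{% endcomment %}' in lines[i]:
--             depth -= 1
--         if '{% comment' in lines[i]:
--             depth += 1
--             if depth > 0:
--                 return True
--     return False
-- ===== SOURCE B (Python) =====
-- def is_inside_comment_block(lines, line_idx):
--     """Check if line is inside {% comment %} ... {% endcomment %}."""
--     depth = 0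
--     for i in range(line_idx + 1):
--         line = lines[i]
--         if '{% comment' in line:
--             depth += 1
--         if '{% endcomment %}' in line:
--             depth = max(0, depth - 1)
--     return depth > 0
-- ===== Notes on version B (the rewrite author's own statement) =====
-- stated objective: idiomatic
-- what changed: A scans backward from line_idx with an early return inside the loop; B makes a single forward pass over lines[0..line_idx] accumulating a comment depth clamped at zero and returns depth > 0 at the end.
import Mathlib
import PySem

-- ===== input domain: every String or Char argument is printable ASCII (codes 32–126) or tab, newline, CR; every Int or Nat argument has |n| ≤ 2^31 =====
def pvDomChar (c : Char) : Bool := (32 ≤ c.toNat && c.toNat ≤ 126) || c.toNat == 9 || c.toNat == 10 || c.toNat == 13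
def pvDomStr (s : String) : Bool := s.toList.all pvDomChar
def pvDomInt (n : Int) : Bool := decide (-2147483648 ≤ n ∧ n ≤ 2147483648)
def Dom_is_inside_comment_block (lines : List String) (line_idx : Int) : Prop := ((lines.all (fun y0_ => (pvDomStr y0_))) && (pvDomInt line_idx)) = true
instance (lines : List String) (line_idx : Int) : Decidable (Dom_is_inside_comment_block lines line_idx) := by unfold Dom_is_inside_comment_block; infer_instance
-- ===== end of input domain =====

-- B replaces A's backward early-return scan by a single forward depth accumulation
-- (clamped at zero) over the prefix lines[0..line_idx]; same return value (idiomatic objective).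

-- ===== PORT A =====
-- A's backward loop: for i in range(line_idx, -1, -1), early return True when depth becomes positive
def pvGoA (lines : List String) : List Int → Int → Bool
  | [], _ => false
  | i :: rest, depth =>
    let line := PySem.List.pyGetD lines i ""
    let depth1 := if PySem.Str.isIn "{% endcomment %}" line then depth - 1 else depth
    if PySem.Str.isIn "{% comment" line then
      if depth1 + 1 > 0 then true else pvGoA lines rest (depth1 + 1)
    else pvGoA lines rest depth1

def is_inside_comment_block (lines : List String) (line_idx : Int) : Bool :=
  pvGoA lines (PySem.List.pyRange line_idx (-1) (-1)) 0

-- ===== PORT B =====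
-- one forward step of Source B's loop body
def pvStepB (depth : Int) (line : String) : Int :=
  let d1 := if PySem.Str.isIn "{% comment" line then depth + 1 else depth
  if PySem.Str.isIn "{% endcomment %}" line then max 0 (d1 - 1) else d1

def is_inside_comment_block_alt (lines : List String) (line_idx : Int) : Bool :=
  decide (0 < (PySem.List.pyRange 0 (line_idx + 1) 1).foldl
    (fun depth i => pvStepB depth (PySem.List.pyGetD lines i "")) 0)

-- ===== PRECONDITION & SPEC =====
-- A raises IndexError exactly when 0 ≤ line_idx and line_idx ≥ len(lines); Pre_ excludes only those inputs.
def Pre_is_inside_comment_block (lines : List String) (line_idx : Int) : Prop :=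
  line_idx < (lines.length : Int)
instance (lines : List String) (line_idx : Int) : Decidable (Pre_is_inside_comment_block lines line_idx) := by
  unfold Pre_is_inside_comment_block; infer_instance

def pvWitness_is_inside_comment_block : List String × Int :=
  (["{% comment %}", "hello"], 1)

def Spec_is_inside_comment_block (lines : List String) (line_idx : Int) (out : Bool) : Prop := out = is_inside_comment_block_alt lines line_idx
instance (lines : List String) (line_idx : Int) (out : Bool) : Decidable (Spec_is_inside_comment_block lines line_idx out) := by unfold Spec_is_inside_comment_block; infer_instance

-- ===== CLAIM (what is proved, stated in full; the proofs are below) =====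
def Claim_equal_is_inside_comment_block : Prop := ∀ (lines : List String) (line_idx : Int), Dom_is_inside_comment_block lines line_idx → Pre_is_inside_comment_block lines line_idx → Spec_is_inside_comment_block lines line_idx (is_inside_comment_block lines line_idx)

-- ===== LEMMAS AND PROOFS =====

-- tag tests and per-line depth delta, abstracted for the proofs
def pvC (l : String) : Bool := PySem.Str.isIn "{% comment" l
def pvE (l : String) : Bool := PySem.Str.isIn "{% endcomment %}" l
def pvD (l : String) : Int := (if pvC l then 1 else 0) - (if pvE l then 1 else 0)

-- best depth offset among comment-tagged positions of the backward scan (none: no comment tag)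
def pvU : List String → Option Int
  | [] => none
  | l :: rest =>
    match pvU rest with
    | none => if pvC l then some (pvD l) else none
    | some t => if pvC l then some (max (pvD l) (pvD l + t)) else some (pvD l + t)

-- list-level version of A's backward loop (its argument is the reversed prefix)
def pvBwd : List String → Int → Bool
  | [], _ => false
  | l :: rest, depth =>
    let depth1 := if pvE l then depth - 1 else depth
    if pvC l then
      if depth1 + 1 > 0 then true else pvBwd rest (depth1 + 1)
    else pvBwd rest depth1

-- A's scan started at offset δ succeeds iff δ plus the best comment-tagged offset is positive
theorem pvBwd_eq_pvU (M : List String) : ∀ δ : Int,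
    pvBwd M δ = match pvU M with
                | none => false
                | some t => decide (0 < δ + t) := by
  induction M with
  | nil => intro δ; simp [pvBwd, pvU]
  | cons l rest ih =>
    intro δ
    simp only [pvBwd, pvU]
    by_cases hc : pvC l <;> by_cases he : pvE l <;>
      cases hU : pvU rest <;>
      simp [hc, he, ih, hU, pvD] <;>
      (first
        | omega
        | (rw [Bool.eq_iff_iff]
           simp only [Bool.or_eq_true, decide_eq_true_iff]
           omega))

-- on a nonnegative depth, B's step is "add the delta and clamp at zero"
theorem pvStepB_eq (δ : Int) (l : String) (hδ : 0 ≤ δ) :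
    pvStepB δ l = max 0 (δ + pvD l) := by
  have h : pvStepB δ l
      = (let d1 := if pvC l then δ + 1 else δ; if pvE l then max 0 (d1-1) else d1) := rfl
  rw [h]
  by_cases hc : pvC l <;> by_cases he : pvE l <;> simp [hc, he, pvD] <;> omega

-- B's forward clamped fold over the prefix = clamped best offset of the reversed prefix
theorem pvFold_eq_pvU : ∀ M : List String,
    M.reverse.foldl pvStepB 0 = max 0 ((pvU M).getD (-1)) := by
  intro M
  induction M with
  | nil => simp [pvU]
  | cons l rest ih =>
    have hnn : (0:Int) ≤ rest.reverse.foldl pvStepB 0 := by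
      rw [ih]; exact le_max_left 0 _
    rw [List.reverse_cons, List.foldl_append, List.foldl_cons, List.foldl_nil,
        pvStepB_eq _ _ hnn, ih]
    simp only [pvU]
    by_cases hc : pvC l <;> by_cases he : pvE l <;> cases hU : pvU rest <;>
      simp [hc, he, pvD] <;> omega

-- one unfolding step of A's loop matches one step of the list-level backward scan
theorem pvGoA_cons_congr (lines : List String) (i : Int) (idxs : List Int) (l : String)
    (M : List String) (hl : PySem.List.pyGetD lines i "" = l)
    (ih : ∀ δ : Int, pvGoA lines idxs δ = pvBwd M δ) :
    ∀ δ : Int, pvGoA lines (i :: idxs) δ = pvBwd (l :: M) δ := by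
  intro δ
  show (let line := PySem.List.pyGetD lines i ""
        let depth1 := if PySem.Str.isIn "{% endcomment %}" line then δ - 1 else δ
        if PySem.Str.isIn "{% comment" line then
          if depth1 + 1 > 0 then true else pvGoA lines idxs (depth1 + 1)
        else pvGoA lines idxs depth1)
      = (let depth1 := if pvE l then δ - 1 else δ
         if pvC l then
           if depth1 + 1 > 0 then true else pvBwd M (depth1 + 1)
         else pvBwd M depth1)
  rw [hl]
  simp only [pvC, pvE]
  split_ifs <;> simp [ih]

-- bridge for A: the index loop equals the list-level backward scan of the reversed prefix
theorem pvGoA_bridge (lines : List String) : ∀ (n : Nat), n < lines.length → ∀ δ : Int,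
    pvGoA lines (PySem.List.pyRange (n : Int) (-1) (-1)) δ
      = pvBwd ((lines.take (n+1)).reverse) δ := by
  intro n
  induction n with
  | zero =>
    intro h δ
    rw [PySem.List.pyRange_neg_one_cons (by omega),
        show ((0:Nat):Int) - 1 = -1 by simp,
        PySem.List.pyRange_neg_one_eq_nil le_rfl,
        List.take_add_one, List.take_zero, List.getElem?_eq_getElem h]
    simp only [List.nil_append, Option.toList_some, List.reverse_cons, List.reverse_nil]
    exact pvGoA_cons_congr lines _ [] lines[0] []
      (by rw [PySem.List.pyGetD_natCast lines 0 "", List.getD_eq_getElem lines "" h])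
      (fun δ' => rfl) δ
  | succ m ih =>
    intro h δ
    rw [PySem.List.pyRange_neg_one_cons (by omega),
        show ((m+1:Nat):Int) - 1 = ((m:Nat):Int) by push_cast; ring,
        List.take_add_one, List.getElem?_eq_getElem h]
    simp only [Option.toList_some, List.reverse_append, List.reverse_cons, List.reverse_nil,
      List.nil_append, List.cons_append]
    exact pvGoA_cons_congr lines _ _ lines[m+1] _
      (by rw [PySem.List.pyGetD_natCast lines (m+1) "", List.getD_eq_getElem lines "" h])
      (ih (by omega)) δ

-- bridge for B: the index fold equals the list fold over the prefix
theorem pvFoldB_bridge (lines : List String) : ∀ (n : Nat), n ≤ lines.length →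
    (PySem.List.pyRange 0 (n : Int) 1).foldl
        (fun depth i => pvStepB depth (PySem.List.pyGetD lines i "")) 0
      = (lines.take n).foldl pvStepB 0 := by
  intro n
  induction n with
  | zero => intro _; rw [PySem.List.pyRange_one_eq_nil (by omega)]; simp
  | succ m ih =>
    intro h
    rw [show ((m+1:Nat):Int) = ((m:Nat):Int) + 1 by push_cast; ring,
        PySem.List.pyRange_one_succ_right (by omega), List.foldl_append,
        List.take_add_one, List.getElem?_eq_getElem (show m < lines.length by omega),
        List.foldl_append, ih (by omega)]
    simp [PySem.List.pyGetD_natCast lines m "",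
      List.getElem?_eq_getElem (show m < lines.length by omega)]

-- ===== VERDICT (by name: the statement is the Claim_ definition above) =====
theorem is_inside_comment_block_spec : Claim_equal_is_inside_comment_block := by
  intro lines line_idx _ hpre
  unfold Spec_is_inside_comment_block is_inside_comment_block is_inside_comment_block_alt
  by_cases hneg : line_idx < 0
  · rw [PySem.List.pyRange_neg_one_eq_nil (by omega), PySem.List.pyRange_one_eq_nil (by omega)]
    simp [pvGoA]
  · have hn : line_idx = ((line_idx.toNat : Nat) : Int) := by omega
    have hlt : line_idx.toNat < lines.length := by
      unfold Pre_is_inside_comment_block at hpre; omega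
    rw [hn, pvGoA_bridge lines line_idx.toNat hlt 0,
        show ((line_idx.toNat : Nat) : Int) + 1 = ((line_idx.toNat + 1 : Nat) : Int) by push_cast; ring,
        pvFoldB_bridge lines (line_idx.toNat + 1) (by omega),
        pvBwd_eq_pvU]
    have hF := pvFold_eq_pvU ((lines.take (line_idx.toNat + 1)).reverse)
    rw [List.reverse_reverse] at hF
    rw [hF]
    cases hU : pvU ((lines.take (line_idx.toNat + 1)).reverse) with
    | none => simp
    | some t =>
      simp only [Option.getD_some]
      rw [Bool.eq_iff_iff]
      simp only [decide_eq_true_iff]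
      omega
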